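-- pv_equiv track=rewrite | github.com/EllaSchafer/Python-Homeworks | HW_5/assignment5_3.py | replace_with_question
-- ===== SOURCE A (Python) =====
-- def replace_with_question(message):
--     """
--     takes the first occurrence of a character and converts it into a question mark
--     :param message: string that will be converted
--     :return: message that has ?'s in place of first variable
--     """
--     # initializes variables
--     hist = dict()
--     x = 0
--     message = list(message)  # turns string into a list
--     mess = []
--
--     while x < len(message):
--         if (ord('a') <= ord(message[x]) <= ord('z')) or (
--                 ord('A') <= ord(message[x]) <= ord('Z')):  # if x is a character
--             if message[x] in hist:  # if the letter has appeared before
--                 # hist[message[x]] += 1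
--                 mess.append(message[x])
--             else:  # adds to the histogram and appends character as '?'
--                 hist[message[x]] = 1
--                 mess.append('?')
--         else:
--             mess.append(message[x])  # if x is not a character
--         x += 1  # keeps while loop going
--
--     return "".join(mess)  # joins the list together as a string
-- ===== SOURCE B (Python) =====
-- def replace_with_question(message):
--     """
--     takes the first occurrence of a character and converts it into a question mark
--     :param message: string that will be converted
--     :return: message that has ?'s in place of first variable
--     """
--     # pass 1: record the index of the first occurrence of each ASCII letter
--     first = {}
--     for i, ch in enumerate(message):
--         if ('a' <= ch <= 'z' or 'A' <= ch <= 'Z') and ch not in first: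
--             first[ch] = i
--     # pass 2: emit '?' exactly at those first-occurrence positions
--     return ''.join('?' if first.get(ch) == i else ch for i, ch in enumerate(message))
-- ===== Notes on version B (the rewrite author's own statement) =====
-- stated objective: faster
-- what changed: Replaces A's single interleaved while-loop (seen-histogram consulted and output list appended character by character, with ord() range tests) by two separate passes: a first enumerate pass building a dict of first-occurrence index per letter, then a join over a generator emitting a question mark exactly where the index equals that letter's recorded first index.
import Mathlib
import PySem

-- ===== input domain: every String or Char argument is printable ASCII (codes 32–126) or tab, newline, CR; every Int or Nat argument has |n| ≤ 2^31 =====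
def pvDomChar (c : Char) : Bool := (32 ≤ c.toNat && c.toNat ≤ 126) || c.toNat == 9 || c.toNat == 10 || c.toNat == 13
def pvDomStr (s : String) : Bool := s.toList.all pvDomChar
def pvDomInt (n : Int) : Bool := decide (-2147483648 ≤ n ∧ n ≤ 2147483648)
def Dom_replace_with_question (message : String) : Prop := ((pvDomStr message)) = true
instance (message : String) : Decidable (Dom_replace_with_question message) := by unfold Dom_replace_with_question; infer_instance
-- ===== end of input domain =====

-- B splits A's single interleaved seen-set pass into two passes (first-occurrence index dict, then position-keyed emission); return values proved equal on all inputs.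


-- ===== PORT A =====
-- while loop over the characters, carrying the histogram dict and the output list 'mess'
def pvGoA : List Char → PySem.Dict Char Int → List Char → List Char
  | [], _, mess => mess
  | c :: rest, hist, mess =>
    if ('a' ≤ c && c ≤ 'z') || ('A' ≤ c && c ≤ 'Z') then
      if hist.contains c then pvGoA rest hist (mess ++ [c])
      else pvGoA rest (hist.insert c 1) (mess ++ ['?'])
    else pvGoA rest hist (mess ++ [c])

def replace_with_question (message : String) : String :=
  String.mk (pvGoA message.toList PySem.Dict.empty [])

-- ===== PORT B =====
def pvLetter (c : Char) : Bool := ('a' ≤ c && c ≤ 'z') || ('A' ≤ c && c ≤ 'Z')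

-- pass 1: dict from each letter to the index of its first occurrence
def pvFirst (cs : List Char) : PySem.Dict Char Int :=
  (PySem.List.enumerate cs).foldl
    (fun d p => if pvLetter p.2 && !(d.contains p.2) then d.insert p.2 p.1 else d)
    PySem.Dict.empty

def replace_with_question_alt (message : String) : String :=
  let first := pvFirst message.toList
  String.mk ((PySem.List.enumerate message.toList).map
    (fun p => if first.get? p.2 == some p.1 then '?' else p.2))

-- ===== PRECONDITION & SPEC =====
def Spec_replace_with_question (message : String) (out : String) : Prop := out = replace_with_question_alt message
instance (message : String) (out : String) : Decidable (Spec_replace_with_question message out) := by unfold Spec_replace_with_question; infer_instance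

-- ===== CLAIM (what is proved, stated in full; the proofs are below) =====
def Claim_equal_replace_with_question : Prop := ∀ (message : String), Dom_replace_with_question message → Spec_replace_with_question message (replace_with_question message)

-- ===== LEMMAS AND PROOFS =====

-- common specification: left-to-right, '?' at the first unseen letter, seen-predicate threaded
def pvSpec (p : Char → Bool) : List Char → List Char
  | [] => []
  | c :: rest =>
    if pvLetter c && !(p c) then '?' :: pvSpec (fun x => x == c || p x) rest
    else c :: pvSpec p rest

lemma pvSpec_congr (ys : List Char) (p q : Char → Bool) (h : ∀ x, p x = q x) :
    pvSpec p ys = pvSpec q ys := by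
  have hpq : p = q := funext h
  rw [hpq]

lemma pvGoA_eq (cs : List Char) (hist : PySem.Dict Char Int) (mess : List Char) :
    pvGoA cs hist mess = mess ++ pvSpec (fun x => hist.contains x) cs := by
  induction cs generalizing hist mess with
  | nil => simp [pvGoA, pvSpec]
  | cons c rest ih =>
    by_cases hl : (('a' ≤ c && c ≤ 'z') || ('A' ≤ c && c ≤ 'Z')) = true
    · by_cases hc : hist.contains c = true
      · simp [pvGoA, pvSpec, hl, hc, pvLetter, ih]
      · have hins : (fun x => (hist.insert c 1).contains x) = (fun x => x == c || hist.contains x) :=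
          funext fun x => PySem.Dict.contains_insert hist c x 1
        simp [pvGoA, pvSpec, hl, hc, pvLetter, ih, hins]
    · simp [pvGoA, pvSpec, hl, pvLetter, ih]

-- once a key is absent-because-nonletter or already present, the first-occurrence fold never changes its get?
lemma pvFold_get?_frozen (ys : List (Int × Char)) (d : PySem.Dict Char Int) (x : Char)
    (h : pvLetter x = false ∨ d.contains x = true) :
    ((ys.foldl (fun d p => if pvLetter p.2 && !(d.contains p.2) then d.insert p.2 p.1 else d) d).get? x)
      = d.get? x := by
  induction ys generalizing d with
  | nil => rfl
  | cons p rest ih =>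
    simp only [List.foldl_cons]
    by_cases hp : (pvLetter p.2 && !(d.contains p.2)) = true
    · have hne : x ≠ p.2 := by
        rcases h with h | h
        · intro he; rw [he] at h; simp [h] at hp
        · intro he; rw [he] at h; simp [h] at hp
      have h' : pvLetter x = false ∨ (d.insert p.2 p.1).contains x = true := by
        rcases h with h | h
        · exact Or.inl h
        · exact Or.inr (by rw [PySem.Dict.contains_insert]; simp [h])
      rw [hp, if_pos rfl]  -- reduce the if
      rw [ih _ h', PySem.Dict.get?_insert_of_ne _ _ hne]
    · rw [if_neg hp]
      exact ih _ h
  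
lemma pvMapB_eq (ys : List Char) (k : Int) (d : PySem.Dict Char Int)
    (hv : ∀ x j, d.get? x = some j → j < k)
    (hl : ∀ x, d.contains x = true → pvLetter x = true) :
    ((PySem.List.enumerate ys k).map
      (fun p => if ((PySem.List.enumerate ys k).foldl
          (fun d p => if pvLetter p.2 && !(d.contains p.2) then d.insert p.2 p.1 else d) d).get? p.2
          == some p.1 then '?' else p.2))
      = pvSpec (fun x => d.contains x) ys := by
  induction ys generalizing k d with
  | nil => simp [PySem.List.enumerate_nil, pvSpec]
  | cons c rest ih =>
    rw [PySem.List.enumerate_cons]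
    simp only [List.foldl_cons, List.map_cons]
    by_cases hp : (pvLetter c && !(d.contains c)) = true
    · -- first occurrence of the letter c: recorded at index k
      have hdc : d.contains c = false := by
        cases hdc : d.contains c
        · rfl
        · rw [hdc] at hp; simp at hp
      have hlc : pvLetter c = true := by
        cases hlc : pvLetter c
        · rw [hlc] at hp; simp at hp
        · rfl
      have hfull : ((PySem.List.enumerate rest (k+1)).foldl
          (fun d p => if pvLetter p.2 && !(d.contains p.2) then d.insert p.2 p.1 else d)
          (d.insert c k)).get? c = some k := by
        rw [pvFold_get?_frozen _ _ _ (Or.inr (PySem.Dict.contains_insert_self d c k)),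
          PySem.Dict.get?_insert_self]
      have hv' : ∀ x j, (d.insert c k).get? x = some j → j < k + 1 := by
        intro x j hx
        by_cases he : x = c
        · subst he; rw [PySem.Dict.get?_insert_self] at hx
          simp only [Option.some.injEq] at hx; omega
        · rw [PySem.Dict.get?_insert_of_ne _ _ he] at hx
          have := hv x j hx; omega
      have hl' : ∀ x, (d.insert c k).contains x = true → pvLetter x = true := by
        intro x hx
        rw [PySem.Dict.contains_insert] at hx
        by_cases he : x = c
        · subst he; exact hlc
        · simp [he] at hx; exact hl x hx
      have htl := ih (k+1) (d.insert c k) hv' hl'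
      have hins : ∀ x, (d.insert c k).contains x = (x == c || d.contains x) :=
        fun x => PySem.Dict.contains_insert d c x k
      rw [if_pos hp, hfull]
      rw [if_pos (show (some k == some k) = true by simp)]
      simp only [pvSpec]
      rw [if_pos (show (pvLetter c && !(d.contains c)) = true from hp)]
      exact congrArg (List.cons '?') (htl.trans (pvSpec_congr _ _ _ hins))
    · -- c is not a fresh letter: output stays c
      have hd' : ((PySem.List.enumerate rest (k+1)).foldl
          (fun d p => if pvLetter p.2 && !(d.contains p.2) then d.insert p.2 p.1 else d) d).get? c
          = d.get? c := by
        apply pvFold_get?_frozen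
        by_cases hlc : pvLetter c = true
        · right
          by_cases hdc : d.contains c = true
          · exact hdc
          · simp [hlc, hdc] at hp
        · left; simpa using hlc
      have hhead : (d.get? c == some k) = false := by
        cases hg : d.get? c with
        | none => simp
        | some j => have := hv c j hg; simp; omega
      have hv' : ∀ x j, d.get? x = some j → j < k + 1 := fun x j hx => by
        have := hv x j hx; omega
      have htl := ih (k+1) d hv' hl
      simp only [if_neg hp, hd', hhead, Bool.false_eq_true, if_false, pvSpec]
      rw [htl]

-- ===== VERDICT (by name: the statement is the Claim_ definition above) =====
theorem replace_with_question_spec : Claim_equal_replace_with_question := by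
  intro message _
  unfold Spec_replace_with_question replace_with_question replace_with_question_alt pvFirst
  rw [pvGoA_eq]
  have h := pvMapB_eq message.toList 0 PySem.Dict.empty
    (fun x j hx => by simp [PySem.Dict.get?_empty] at hx)
    (fun x hx => by simp [PySem.Dict.contains_empty] at hx)
  simp only [List.nil_append]
  exact (congrArg String.mk h).symm
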